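-- pv_equiv track=rewrite | github.com/guilhermegouw/Dojo | secret_sentence/challenge.py | decode_luka_comprehension
-- ===== SOURCE A (Python) =====
-- def decode_luka_comprehension(sentence):
--     vowels = "aeiou"
--     return "".join(
--         sentence[i]
--         for i in range(len(sentence))
--         if not (
--             sentence[i] in vowels
--             and i + 2 < len(sentence)
--             and sentence[i + 1] == "p"
--             and sentence[i + 2] == sentence[i]
--         )
--     )
-- ===== SOURCE B (Python) =====
-- def decode_luka_comprehension(sentence):
--     # Consume the sentence as an explicit stack (top = next character):
--     # pop one char at a time; while at least two chars remain on the stack,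
--     # the popped char is dropped iff it is a vowel, the top is 'p' and the
--     # char below the top equals it; the final <2 leftover chars are kept.
--     stack = list(reversed(sentence))
--     out = []
--     while len(stack) >= 3:
--         a = stack.pop()
--         if not (a in "aeiou" and stack[-1] == "p" and stack[-2] == a):
--             out.append(a)
--     out.extend(reversed(stack))
--     return "".join(out)
-- ===== Notes on version B (the rewrite author's own statement) =====
-- stated objective: alternative
-- what changed: Replaces A's index-range comprehension (bounds check and three subscript lookups per index) with an explicit stack: the reversed string is consumed by popping one character while at least three remain, dropping it iff it with the two chars now on top forms the vowel/p/same-vowel pattern, and the final leftover stack is appended.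
import Mathlib
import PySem

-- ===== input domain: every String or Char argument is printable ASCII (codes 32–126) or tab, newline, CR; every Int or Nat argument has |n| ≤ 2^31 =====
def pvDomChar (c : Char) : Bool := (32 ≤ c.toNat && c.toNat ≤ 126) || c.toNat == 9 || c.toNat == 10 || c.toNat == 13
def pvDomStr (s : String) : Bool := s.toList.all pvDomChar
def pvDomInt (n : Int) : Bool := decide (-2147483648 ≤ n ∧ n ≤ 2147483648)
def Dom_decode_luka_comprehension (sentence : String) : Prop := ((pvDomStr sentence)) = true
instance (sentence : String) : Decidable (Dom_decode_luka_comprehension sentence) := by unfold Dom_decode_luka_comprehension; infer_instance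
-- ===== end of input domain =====

-- B replaces A's index-range comprehension by an explicit stack: pop one character at a time while
-- at least three remain, drop it iff it forms the vowel/p/same-vowel pattern with the two now on top, then
-- append the leftover stack (objective: alternative decomposition, same O(n) cost).

-- ===== PORT A =====
-- A: "".join(sentence[i] for i in range(len(sentence)) if not (vowel-p-vowel window at i))
def decode_luka_comprehension (sentence : String) : String :=
  let vowels := "aeiou".toList
  let l := sentence.toList
  let n : Int := (l.length : Int)
  String.mk (((PySem.List.pyRange 0 n 1).filter (fun i =>
      !( vowels.contains (PySem.List.pyGetD l i ' ')
         && decide (i + 2 < n)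
         && (PySem.List.pyGetD l (i + 1) ' ' == 'p')
         && (PySem.List.pyGetD l (i + 2) ' ' == PySem.List.pyGetD l i ' ') ))).map
    (fun i => PySem.List.pyGetD l i ' '))

-- ===== PORT B =====
-- B's while loop: the stack is list(reversed(sentence)) with its TOP (Python's last element)
-- modelled as the Lean list head, so the list below is in sentence order; pop = take the head,
-- stack[-1]/stack[-2] = the next two heads; `out` is the accumulator.
def pvAltLoop (out : List Char) : List Char → List Char
  | a :: b :: c :: t =>
      pvAltLoop (if "aeiou".toList.contains a && b == 'p' && c == a then out else out ++ [a])
        (b :: c :: t)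
  | stack => out ++ stack        -- out.extend(reversed(stack)) when len(stack) < 3
termination_by stack => stack.length

def decode_luka_comprehension_alt (sentence : String) : String :=
  String.mk (pvAltLoop [] sentence.toList)

-- ===== PRECONDITION & SPEC =====
def Spec_decode_luka_comprehension (sentence : String) (out : String) : Prop := out = decode_luka_comprehension_alt sentence
instance (sentence : String) (out : String) : Decidable (Spec_decode_luka_comprehension sentence out) := by unfold Spec_decode_luka_comprehension; infer_instance

-- ===== CLAIM (what is proved, stated in full; the proofs are below) =====
def Claim_equal_decode_luka_comprehension : Prop := ∀ (sentence : String), Dom_decode_luka_comprehension sentence → Spec_decode_luka_comprehension sentence (decode_luka_comprehension sentence)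

-- ===== LEMMAS AND PROOFS =====

/-- The vowel-p-vowel window test shared by the proofs. -/
def pvP (a b c : Char) : Bool := "aeiou".toList.contains a && b == 'p' && c == a

/-- Recursive specification both ports are reduced to. -/
def pvGo : List Char → List Char
  | a :: b :: c :: rest => if pvP a b c then pvGo (b :: c :: rest) else a :: pvGo (b :: c :: rest)
  | l => l
termination_by l => l.length

/-- A's per-index keep test, on natural indices. -/
def pvQ (l : List Char) (k : Nat) : Bool :=
  !( "aeiou".toList.contains (l.getD k ' ')
     && decide (k + 2 < l.length)
     && (l.getD (k + 1) ' ' == 'p')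
     && (l.getD (k + 2) ' ' == l.getD k ' ') )

/-- A's core on natural indices. -/
def pvAcoreN (l : List Char) : List Char :=
  ((List.range l.length).filter (pvQ l)).map (fun k => l.getD k ' ')

lemma pvQ_succ (a : Char) (t : List Char) (k : Nat) : pvQ (a :: t) (k + 1) = pvQ t k := by
  have h : (k + 1 + 2 ≤ t.length) = (k + 2 < t.length) := propext (by omega)
  simp [pvQ, List.length_cons, h]

lemma pvAcoreN_cons (a : Char) (t : List Char) :
    pvAcoreN (a :: t) = (if pvQ (a :: t) 0 then [a] else []) ++ pvAcoreN t := by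
  simp only [pvAcoreN, List.length_cons, List.range_succ_eq_map, List.filter_cons,
    List.filter_map, Function.comp_def, pvQ_succ]
  split_ifs <;> simp [List.map_map, Function.comp_def]

lemma pvAcoreN_eq_go (l : List Char) : pvAcoreN l = pvGo l := by
  fun_induction pvGo l with
  | case1 a b c rest hp ih =>
    rw [pvAcoreN_cons]
    have h0 : pvQ (a :: b :: c :: rest) 0 = !pvP a b c := by
      simp [pvQ, pvP, List.length_cons]
    rw [h0, ih, hp]; simp
  | case2 a b c rest hp ih =>
    rw [pvAcoreN_cons]
    have h0 : pvQ (a :: b :: c :: rest) 0 = !pvP a b c := by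
      simp [pvQ, pvP, List.length_cons]
    rw [h0, ih]
    simp [hp]
  | case3 l h =>
    rcases l with _ | ⟨a, _ | ⟨b, _ | ⟨c, rest⟩⟩⟩
    · simp [pvAcoreN]
    · simp [pvAcoreN, pvQ, List.range_succ]
    · simp [pvAcoreN, pvQ, List.range_succ]
    · exact absurd rfl (h a b c rest)

lemma pvAcore_int (l : List Char) :
    ((PySem.List.pyRange 0 (l.length : Int) 1).filter (fun i =>
      !( "aeiou".toList.contains (PySem.List.pyGetD l i ' ')
         && decide (i + 2 < (l.length : Int))
         && (PySem.List.pyGetD l (i + 1) ' ' == 'p')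
         && (PySem.List.pyGetD l (i + 2) ' ' == PySem.List.pyGetD l i ' ') ))).map
      (fun i => PySem.List.pyGetD l i ' ') = pvAcoreN l := by
  rw [PySem.List.pyRange_one]
  simp only [Int.sub_zero, Int.toNat_natCast, List.filter_map, List.map_map, Function.comp_def,
    zero_add]
  have hc : ∀ k : Nat, ((k : Int) + 1) = ((k + 1 : Nat) : Int) := by intro k; push_cast; ring
  have hc2 : ∀ k : Nat, ((k : Int) + 2) = ((k + 2 : Nat) : Int) := by intro k; push_cast; ring
  simp only [hc, hc2, PySem.List.pyGetD_natCast]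
  simp only [Nat.cast_lt]
  rfl

lemma pvAltLoop_eq_go (out l : List Char) : pvAltLoop out l = out ++ pvGo l := by
  fun_induction pvGo l generalizing out with
  | case1 a b c rest hp ih =>
    rw [pvAltLoop, show ("aeiou".toList.contains a && b == 'p' && c == a) = pvP a b c from rfl,
      hp, if_pos rfl, ih]
  | case2 a b c rest hp ih =>
    rw [pvAltLoop, show ("aeiou".toList.contains a && b == 'p' && c == a) = pvP a b c from rfl]
    have hp' : pvP a b c = false := by simpa using hp
    rw [hp', if_neg (by simp), ih]
    simp
  | case3 l h =>
    rcases l with _ | ⟨a, _ | ⟨b, _ | ⟨c, rest⟩⟩⟩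
    · simp [pvAltLoop]
    · simp [pvAltLoop]
    · simp [pvAltLoop]
    · exact absurd rfl (h a b c rest)

-- ===== VERDICT (by name: the statement is the Claim_ definition above) =====
theorem decode_luka_comprehension_spec : Claim_equal_decode_luka_comprehension := by
  intro s _
  unfold Spec_decode_luka_comprehension decode_luka_comprehension decode_luka_comprehension_alt
  simp only []
  rw [pvAcore_int, pvAcoreN_eq_go, pvAltLoop_eq_go, List.nil_append]
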